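-- pv_equiv track=rewrite | github.com/eliyacobov1/monocular-visual-slam | readiness_report.py | _control_plane_status
-- ===== SOURCE A (Python) =====
-- from typing import Any, Mapping
--
-- def _control_plane_status(state_counts: Mapping[str, int]) -> str:
--     fail_states = {"tripped", "error", "failed", "halted"}
--     warn_states = {"degraded", "recovering"}
--     normalized = {state.lower(): count for state, count in state_counts.items()}
--     if any(state in fail_states for state in normalized):
--         return "fail"
--     if any(state in warn_states for state in normalized):
--         return "warn"
--     if any(state not in fail_states | warn_states | {"healthy", "ok"} for state in normalized):
--         return "unknown"
--     return "pass"
-- ===== SOURCE B (Python) =====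
-- def _control_plane_status(state_counts):
--     has_fail = has_warn = has_unknown = False
--     for state in state_counts:
--         s = state.lower()
--         if s in ("tripped", "error", "failed", "halted"):
--             has_fail = True
--         elif s in ("degraded", "recovering"):
--             has_warn = True
--         elif s not in ("healthy", "ok"):
--             has_unknown = True
--     if has_fail:
--         return "fail"
--     if has_warn:
--         return "warn"
--     if has_unknown:
--         return "unknown"
--     return "pass"
-- ===== Notes on version B (the rewrite author's own statement) =====
-- stated objective: simpler
-- what changed: Replaces A's normalized-dict construction plus three separate any(...) scans with one pass over the keys that maintains three booleans (fail/warn/unknown) and decides by precedence at the end.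
import Mathlib
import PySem

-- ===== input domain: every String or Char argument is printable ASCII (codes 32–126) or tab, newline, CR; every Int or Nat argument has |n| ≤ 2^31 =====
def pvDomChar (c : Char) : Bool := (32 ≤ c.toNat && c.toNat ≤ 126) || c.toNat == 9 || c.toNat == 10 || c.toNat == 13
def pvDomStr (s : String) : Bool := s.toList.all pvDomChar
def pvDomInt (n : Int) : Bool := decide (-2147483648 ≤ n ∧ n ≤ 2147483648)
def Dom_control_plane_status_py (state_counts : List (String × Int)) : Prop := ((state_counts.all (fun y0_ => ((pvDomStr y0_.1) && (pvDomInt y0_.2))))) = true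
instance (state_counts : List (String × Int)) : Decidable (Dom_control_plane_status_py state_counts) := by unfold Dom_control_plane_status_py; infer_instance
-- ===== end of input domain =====

-- B: one pass over the items maintaining three booleans instead of A's normalized dict + three any(...) scans (objective: simpler).

-- ===== PORT A =====
def pvFailStates : PySem.Set String := PySem.Set.ofList ["tripped", "error", "failed", "halted"]
def pvWarnStates : PySem.Set String := PySem.Set.ofList ["degraded", "recovering"]

def control_plane_status_py (state_counts : List (String × Int)) : String :=
  let fail_states := pvFailStates
  let warn_states := pvWarnStates
  let normalized : PySem.Dict String Int :=
    state_counts.foldl (fun d p => d.insert (PySem.Str.lower p.1) p.2) PySem.Dict.empty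
  if normalized.keys.any (fun state => PySem.Set.contains fail_states state) then "fail"
  else if normalized.keys.any (fun state => PySem.Set.contains warn_states state) then "warn"
  else if normalized.keys.any (fun state =>
      !(PySem.Set.contains
          (PySem.Set.union (PySem.Set.union fail_states warn_states)
            (PySem.Set.ofList ["healthy", "ok"])) state)) then "unknown"
  else "pass"

-- ===== PORT B =====
def pvStep (fl : Bool × Bool × Bool) (p : String × Int) : Bool × Bool × Bool :=
  let s := PySem.Str.lower p.1
  if s == "tripped" || s == "error" || s == "failed" || s == "halted" then
    (true, fl.2.1, fl.2.2)
  else if s == "degraded" || s == "recovering" then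
    (fl.1, true, fl.2.2)
  else if !(s == "healthy" || s == "ok") then
    (fl.1, fl.2.1, true)
  else fl

def control_plane_status_py_alt (state_counts : List (String × Int)) : String :=
  let fl := state_counts.foldl pvStep (false, false, false)
  if fl.1 then "fail"
  else if fl.2.1 then "warn"
  else if fl.2.2 then "unknown"
  else "pass"

-- ===== PRECONDITION & SPEC =====
def Spec_control_plane_status_py (state_counts : List (String × Int)) (out : String) : Prop := out = control_plane_status_py_alt state_counts
instance (state_counts : List (String × Int)) (out : String) : Decidable (Spec_control_plane_status_py state_counts out) := by unfold Spec_control_plane_status_py; infer_instance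

-- ===== CLAIM (what is proved, stated in full; the proofs are below) =====
def Claim_equal_control_plane_status_py : Prop := ∀ (state_counts : List (String × Int)), Dom_control_plane_status_py state_counts → Spec_control_plane_status_py state_counts (control_plane_status_py state_counts)

-- ===== LEMMAS AND PROOFS =====

-- predicates on a lowered state name
def pvIsFail (s : String) : Bool := s == "tripped" || s == "error" || s == "failed" || s == "halted"
def pvIsWarn (s : String) : Bool := s == "degraded" || s == "recovering"
def pvIsOk (s : String) : Bool := s == "healthy" || s == "ok"

lemma pvStep_eq (fl : Bool × Bool × Bool) (p : String × Int) :
    pvStep fl p =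
      if pvIsFail (PySem.Str.lower p.1) then (true, fl.2.1, fl.2.2)
      else if pvIsWarn (PySem.Str.lower p.1) then (fl.1, true, fl.2.2)
      else if !pvIsOk (PySem.Str.lower p.1) then (fl.1, fl.2.1, true)
      else fl := rfl

lemma pvStep_foldl (sc : List (String × Int)) (fl : Bool × Bool × Bool) :
    sc.foldl pvStep fl =
      (fl.1 || sc.any (fun p => pvIsFail (PySem.Str.lower p.1)),
       fl.2.1 || sc.any (fun p => !pvIsFail (PySem.Str.lower p.1) && pvIsWarn (PySem.Str.lower p.1)),
       fl.2.2 || sc.any (fun p => !pvIsFail (PySem.Str.lower p.1) && !pvIsWarn (PySem.Str.lower p.1) && !pvIsOk (PySem.Str.lower p.1))) := by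
  induction sc generalizing fl with
  | nil => simp
  | cons h t ih =>
    simp only [List.foldl_cons, List.any_cons, ih, pvStep_eq]
    split_ifs with h1 h2 h3 <;> simp_all

lemma pvAny_ofList (l : List String) (p : String → Bool) :
    (PySem.Set.ofList l).any p = l.any p := by
  rw [Bool.eq_iff_iff]
  simp only [List.any_eq_true]
  constructor
  · rintro ⟨x, hx, hp⟩; exact ⟨x, (PySem.Set.mem_ofList _ _).1 hx, hp⟩
  · rintro ⟨x, hx, hp⟩; exact ⟨x, (PySem.Set.mem_ofList _ _).2 hx, hp⟩

lemma pvKeys_normalized (sc : List (String × Int)) :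
    (sc.foldl (fun d p => d.insert (PySem.Str.lower p.1) p.2) PySem.Dict.empty).keys
      = PySem.Set.ofList (sc.map (fun p => PySem.Str.lower p.1)) := by
  rw [PySem.Dict.keys_foldl_insert_key]
  simp [PySem.Set.update_nil_left]

lemma pvContains_fail (s : String) : PySem.Set.contains pvFailStates s = pvIsFail s := by
  simp [pvFailStates, pvIsFail, PySem.Set.contains, PySem.Set.ofList, List.contains_eq_mem,
    List.mem_cons, beq_eq_decide, Bool.or_assoc]

lemma pvContains_warn (s : String) : PySem.Set.contains pvWarnStates s = pvIsWarn s := by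
  simp [pvWarnStates, pvIsWarn, PySem.Set.contains, PySem.Set.ofList, List.contains_eq_mem,
    List.mem_cons, beq_eq_decide]

lemma pvContains_all (s : String) :
    PySem.Set.contains
      (PySem.Set.union (PySem.Set.union pvFailStates pvWarnStates)
        (PySem.Set.ofList ["healthy", "ok"])) s
      = (pvIsFail s || pvIsWarn s || pvIsOk s) := by
  simp [pvFailStates, pvWarnStates, pvIsFail, pvIsWarn, pvIsOk, PySem.Set.contains,
    PySem.Set.ofList, PySem.Set.union, PySem.Set.add, List.contains_eq_mem,
    List.mem_cons, beq_eq_decide, Bool.or_assoc]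

-- ===== VERDICT (by name: the statement is the Claim_ definition above) =====
lemma pvAny_and_not (sc : List (String × Int)) (p q : (String × Int) → Bool)
    (h : ∀ x ∈ sc, p x = false) :
    sc.any (fun x => !p x && q x) = sc.any q := by
  rw [Bool.eq_iff_iff]
  simp only [List.any_eq_true]
  constructor
  · rintro ⟨x, hx, hq⟩; exact ⟨x, hx, by simp [h x hx] at hq; exact hq⟩
  · rintro ⟨x, hx, hq⟩; exact ⟨x, hx, by simp [h x hx, hq]⟩

theorem control_plane_status_py_spec : Claim_equal_control_plane_status_py := by
  intro sc _
  unfold Spec_control_plane_status_py control_plane_status_py control_plane_status_py_alt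
  simp only [pvKeys_normalized, pvAny_ofList, List.any_map, Function.comp_def, pvStep_foldl,
    pvContains_fail, pvContains_warn, pvContains_all, Bool.false_or, Bool.not_or,
    Bool.and_assoc]
  by_cases hf : sc.any (fun p => pvIsFail (PySem.Str.lower p.1)) = true
  · simp [hf]
  · replace hf : sc.any (fun p => pvIsFail (PySem.Str.lower p.1)) = false :=
      Bool.eq_false_iff.mpr hf
    have hfm : ∀ p ∈ sc, pvIsFail (PySem.Str.lower p.1) = false := by
      simpa [List.any_eq_false] using hf
    rw [hf, pvAny_and_not sc _ _ hfm, pvAny_and_not sc _ _ hfm]
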